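-- pv_equiv track=rewrite | github.com/harinins28/Different-Cryptographic-Techniques | 12Myszkowiski.py | get_key_order
-- ===== SOURCE A (Python) =====
-- def get_key_order(key):
--     key = key.upper()
--     key_order = {}
--     current = 1
--     for char in sorted(set(key)):
--         indexes = [i for i, c in enumerate(key) if c == char]
--         for i in indexes:
--             key_order[i] = current
--         current += 1
--     return [key_order[i] for i in range(len(key))]
-- ===== SOURCE B (Python) =====
-- def get_key_order(key):
--     key = key.upper()
--     distinct = set(key)
--     return [sum(1 for c in distinct if c <= ch) for ch in key]
-- ===== Notes on version B (the rewrite author's own statement) =====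
-- stated objective: simpler
-- what changed: Replaces the sort-distinct-chars + per-char rescan + index dict of A by a direct per-position count: the rank of a character is the number of distinct characters <= it, so B computes each entry with one counting comprehension and no sort, no dict and no rescan loop.
import Mathlib
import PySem

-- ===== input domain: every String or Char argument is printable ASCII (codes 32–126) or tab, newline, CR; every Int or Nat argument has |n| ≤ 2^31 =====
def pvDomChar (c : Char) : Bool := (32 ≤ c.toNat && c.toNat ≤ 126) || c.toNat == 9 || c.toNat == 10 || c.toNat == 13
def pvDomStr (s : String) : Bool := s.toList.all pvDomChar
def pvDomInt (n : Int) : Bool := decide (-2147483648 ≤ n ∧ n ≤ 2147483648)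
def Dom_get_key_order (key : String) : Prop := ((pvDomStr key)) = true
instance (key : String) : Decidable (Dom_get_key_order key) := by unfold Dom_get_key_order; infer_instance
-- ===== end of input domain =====

-- B replaces A's sort + per-character rescans + index dict by a per-position count of distinct
-- characters ≤ the character (objective: simpler).

-- ===== PORT A =====
-- one iteration of A's outer 'for char in sorted(set(key))' loop; state = (key_order dict, current)
def pvStepA (cs : List Char) (st : PySem.Dict Int Int × Int) (char : Char) : PySem.Dict Int Int × Int :=
  let indexes := ((PySem.List.enumerate cs).filter (fun p => p.2 == char)).map (fun p => p.1)
  (indexes.foldl (fun d i => d.insert i st.2) st.1, st.2 + 1)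

def get_key_order (key : String) : List Int :=
  let cs := PySem.Chars.upper key.toList
  let st := (PySem.List.sorted (PySem.Set.ofList cs) (fun x => x)).foldl (pvStepA cs) (PySem.Dict.empty, 1)
  -- key_order[i]: every i in range(len(key)) is a key of the dict, so getD never takes its default
  (PySem.List.pyRange 0 (cs.length : Int)).map (fun i => st.1.getD i 0)

-- ===== PORT B =====
def get_key_order_alt (key : String) : List Int :=
  let cs := PySem.Chars.upper key.toList
  let distinct := PySem.Set.ofList cs
  -- sum(1 for c in distinct if c <= ch): order-independent consumption of the set
  cs.map (fun ch => distinct.foldl (fun acc c => if c ≤ ch then acc + 1 else acc) (0 : Int))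

-- ===== PRECONDITION & SPEC =====
def Spec_get_key_order (key : String) (out : List Int) : Prop := out = get_key_order_alt key
instance (key : String) (out : List Int) : Decidable (Spec_get_key_order key out) := by unfold Spec_get_key_order; infer_instance

-- ===== CLAIM (what is proved, stated in full; the proofs are below) =====
def Claim_equal_get_key_order : Prop := ∀ (key : String), Dom_get_key_order key → Spec_get_key_order key (get_key_order key)

-- ===== LEMMAS AND PROOFS =====

-- folding insert over a list of keys, all with the same value
theorem pv_insert_fold (js : List Int) (d : PySem.Dict Int Int) (v i : Int) :
    (js.foldl (fun d j => d.insert j v) d).getD i 0 = if i ∈ js then v else d.getD i 0 := by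
  induction js generalizing d with
  | nil => simp
  | cons j t ih =>
      simp only [List.foldl_cons, ih, PySem.Dict.getD_insert, List.mem_cons]
      by_cases h1 : i ∈ t <;> by_cases h2 : i = j <;> simp [h1, h2]

-- membership in A's 'indexes' list
theorem pv_mem_indexes (cs : List Char) (c : Char) (i : Nat) (hi : i < cs.length) :
    ((i : Int) ∈ ((PySem.List.enumerate cs).filter (fun p => p.2 == c)).map (fun p => p.1)) ↔ cs[i] = c := by
  simp only [List.mem_map, List.mem_filter, PySem.List.mem_enumerate_iff]
  constructor
  · rintro ⟨⟨a, ch⟩, ⟨⟨k, hk, hp⟩, hc⟩, hfst⟩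
    simp only [Prod.mk.injEq] at hp
    obtain ⟨ha, hch⟩ := hp
    simp only at hfst hc
    have hik : i = k := by omega
    subst hik
    rw [hch] at hc
    exact (beq_iff_eq.mp hc)
  · intro h
    exact ⟨((i : Int), cs[i]), ⟨⟨i, hi, by simp⟩, by simp [h]⟩, rfl⟩

-- invariant of A's outer loop
theorem pv_A_inv (cs : List Char) (L : List Char) (hnd : L.Nodup) (d : PySem.Dict Int Int)
    (cur : Int) (i : Nat) (hi : i < cs.length) :
    ((L.foldl (pvStepA cs) (d, cur)).1).getD (i : Int) 0 =
      if cs[i] ∈ L then cur + (L.idxOf cs[i] : Int) else d.getD (i : Int) 0 := by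
  induction L generalizing d cur with
  | nil => simp
  | cons c T ih =>
      obtain ⟨hc, hT⟩ := List.nodup_cons.mp hnd
      have hstep : pvStepA cs (d, cur) c =
          ((((PySem.List.enumerate cs).filter (fun p => p.2 == c)).map (fun p => p.1)).foldl
            (fun d i => d.insert i cur) d, cur + 1) := rfl
      rw [List.foldl_cons, hstep, ih hT]
      rw [pv_insert_fold]
      simp only [pv_mem_indexes cs c i hi]
      by_cases h1 : cs[i] ∈ T
      · have hne : cs[i] ≠ c := fun h => hc (h ▸ h1)
        have hbeq : (c == cs[i]) = false := beq_eq_false_iff_ne.mpr (Ne.symm hne)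
        rw [if_pos h1, if_pos (List.mem_cons.mpr (Or.inr h1)), List.idxOf_cons, hbeq]
        simp only [cond_false]
        push_cast
        ring
      · by_cases h2 : cs[i] = c
        · rw [if_neg h1, if_pos h2, if_pos (List.mem_cons.mpr (Or.inl h2)), h2, List.idxOf_cons]
          simp
        · have hmem : cs[i] ∉ c :: T := by simp [h2, h1]
          rw [if_neg h1, if_neg h2, if_neg hmem]

-- in a strictly increasing list, count of elements ≤ a member = its index + 1
theorem pv_count_sorted (S : List Char) (hS : S.Pairwise (· < ·)) (ch : Char) (hmem : ch ∈ S) :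
    (S.countP (fun c => decide (c ≤ ch)) : Int) = (S.idxOf ch : Int) + 1 := by
  induction S with
  | nil => simp at hmem
  | cons a T ih =>
      obtain ⟨ha, hT⟩ := List.pairwise_cons.mp hS
      by_cases h : ch = a
      · subst h
        have h0 : T.countP (fun c => decide (c ≤ ch)) = 0 := by
          rw [List.countP_eq_zero]
          intro b hb
          simp [not_le.mpr (ha b hb)]
        simp [h0]
      · have hchT : ch ∈ T := by
          rcases List.mem_cons.mp hmem with h' | h'
          · exact absurd h' h
          · exact h'
        have hle : a ≤ ch := le_of_lt (ha ch hchT)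
        rw [List.countP_cons]
        simp only [hle, decide_true]
        have hbeq : (a == ch) = false := beq_eq_false_iff_ne.mpr (fun hh => h hh.symm)
        rw [List.idxOf_cons, hbeq]
        simp only [cond_false]
        push_cast [ih hT hchT]
        ring

-- ===== VERDICT (by name: the statement is the Claim_ definition above) =====
theorem get_key_order_spec : Claim_equal_get_key_order := by
  intro key _
  unfold Spec_get_key_order get_key_order get_key_order_alt
  dsimp only
  set cs := PySem.Chars.upper key.toList with hcs
  set S := PySem.List.sorted (PySem.Set.ofList cs) (fun x => x) with hSdef
  have hperm : S.Perm (PySem.Set.ofList cs) := PySem.List.sorted_perm _ _ _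
  have hnd : S.Nodup := hperm.symm.nodup (PySem.Set.nodup_ofList cs)
  have hpw : S.Pairwise (· < ·) := PySem.List.sorted_ofList_pairwise_lt cs
  rw [PySem.List.pyRange_zero_natCast, List.map_map]
  apply List.ext_getElem (by simp)
  intro i h1 h2
  simp only [List.getElem_map, Function.comp, List.getElem_range]
  have hi : i < cs.length := by simpa using h2
  have hmemS : cs[i] ∈ S := by
    rw [PySem.List.mem_sorted, PySem.Set.mem_ofList]
    exact List.getElem_mem hi
  rw [pv_A_inv cs S hnd PySem.Dict.empty 1 i hi]
  rw [if_pos hmemS]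
  rw [PySem.List.foldl_ite_add_one (fun c => c ≤ cs[i])]
  rw [← hperm.countP_eq]
  rw [pv_count_sorted S hpw cs[i] hmemS]
  ring
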